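-- pv_equiv track=rewrite | github.com/rsleiberin/open-darf | tools/text2nkg/score.py | strict_match
-- ===== SOURCE A (Python) =====
-- def strict_match(pred, gold, ignore_label=True):
--     tp=0
--     used=[False]*len(gold)
--     for s,e,l in pred:
--         for j,(gs,ge,gl) in enumerate(gold):
--             if used[j]: continue
--             if s==gs and e==ge and (ignore_label or l==gl):
--                 used[j]=True; tp+=1; break
--     fp = len(pred) - tp
--     fn = len(gold) - tp
--     return tp,fp,fn
-- ===== SOURCE B (Python) =====
-- def strict_match(pred, gold, ignore_label=True):
--     cnt = {}
--     for s, e, l in gold: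
--         k = (s, e, "" if ignore_label else l)
--         cnt[k] = cnt.get(k, 0) + 1
--     tp = 0
--     for s, e, l in pred:
--         k = (s, e, "" if ignore_label else l)
--         c = cnt.get(k, 0)
--         if c > 0:
--             cnt[k] = c - 1
--             tp += 1
--     return tp, len(pred) - tp, len(gold) - tp
-- ===== Notes on version B (the rewrite author's own statement) =====
-- stated objective: faster
-- what changed: B replaces A's O(P*G) nested scan over a used-flags array with a single hash-counter pass: count gold keys once, then decrement per prediction.
import Mathlib
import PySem

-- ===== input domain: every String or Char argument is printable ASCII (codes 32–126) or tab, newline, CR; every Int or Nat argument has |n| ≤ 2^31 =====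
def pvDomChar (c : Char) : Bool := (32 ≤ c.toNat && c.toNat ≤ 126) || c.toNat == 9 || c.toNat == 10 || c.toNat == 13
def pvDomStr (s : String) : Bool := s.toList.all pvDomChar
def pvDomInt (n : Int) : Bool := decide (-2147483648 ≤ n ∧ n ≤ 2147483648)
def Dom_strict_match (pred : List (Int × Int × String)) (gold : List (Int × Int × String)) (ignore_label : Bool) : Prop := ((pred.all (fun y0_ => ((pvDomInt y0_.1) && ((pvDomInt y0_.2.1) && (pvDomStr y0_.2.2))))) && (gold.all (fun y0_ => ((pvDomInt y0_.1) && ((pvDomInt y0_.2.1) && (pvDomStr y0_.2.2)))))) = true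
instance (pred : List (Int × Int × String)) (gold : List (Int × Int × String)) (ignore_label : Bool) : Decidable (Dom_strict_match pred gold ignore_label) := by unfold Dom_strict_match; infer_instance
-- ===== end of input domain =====

-- B counts gold spans in a dict once and decrements per prediction (one pass over each list)
-- instead of A's per-prediction inner scan over a used-flags array; objective: faster.

-- ===== PORT A =====
-- inner loop 'for j,(gs,ge,gl) in enumerate(gold): if used[j]: continue; if s==gs and e==ge and
-- (ignore_label or l==gl): used[j]=True; break' — returns the used list with the first matching
-- unused flag set to True, or none if the loop finds no match (hand-ported, exact)
def pvMark (s e : Int) (l : String) (il : Bool) : List (Int × Int × String) → List Bool → Option (List Bool)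
  | [], _ => none
  | _ :: _, [] => none
  | (gs, ge, gl) :: gt, u :: ut =>
    if u then (pvMark s e l il gt ut).map (u :: ·)
    else if s = gs ∧ e = ge ∧ (il = true ∨ l = gl) then some (true :: ut)
    else (pvMark s e l il gt ut).map (u :: ·)

def strict_match (pred : List (Int × Int × String)) (gold : List (Int × Int × String)) (ignore_label : Bool) : Int × Int × Int :=
  let st := pred.foldl (fun (st : List Bool × Int) p =>
    match pvMark p.1 p.2.1 p.2.2 ignore_label gold st.1 with
    | some used' => (used', st.2 + 1)
    | none => st) (List.replicate gold.length false, 0)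
  (st.2, (pred.length : Int) - st.2, (gold.length : Int) - st.2)

-- ===== PORT B =====
-- Source B's key k = (s, e, "" if ignore_label else l)
def pvKey (il : Bool) (t : Int × Int × String) : Int × Int × String :=
  (t.1, t.2.1, if il then "" else t.2.2)

def strict_match_alt (pred : List (Int × Int × String)) (gold : List (Int × Int × String)) (ignore_label : Bool) : Int × Int × Int :=
  let cnt := gold.foldl (fun (d : PySem.Dict (Int × Int × String) Int) g =>
    let k := pvKey ignore_label g
    d.insert k (d.getD k 0 + 1)) PySem.Dict.empty
  let st := pred.foldl (fun (st : Int × PySem.Dict (Int × Int × String) Int) p =>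
    let k := pvKey ignore_label p
    let c := st.2.getD k 0
    if c > 0 then (st.1 + 1, st.2.insert k (c - 1)) else st) (0, cnt)
  (st.1, (pred.length : Int) - st.1, (gold.length : Int) - st.1)

-- ===== PRECONDITION & SPEC =====
def Spec_strict_match (pred : List (Int × Int × String)) (gold : List (Int × Int × String)) (ignore_label : Bool) (out : Int × Int × Int) : Prop := out = strict_match_alt pred gold ignore_label
instance (pred : List (Int × Int × String)) (gold : List (Int × Int × String)) (ignore_label : Bool) (out : Int × Int × Int) : Decidable (Spec_strict_match pred gold ignore_label out) := by unfold Spec_strict_match; infer_instance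

-- ===== CLAIM (what is proved, stated in full; the proofs are below) =====
def Claim_equal_strict_match : Prop := ∀ (pred : List (Int × Int × String)) (gold : List (Int × Int × String)) (ignore_label : Bool), Dom_strict_match pred gold ignore_label → Spec_strict_match pred gold ignore_label (strict_match pred gold ignore_label)

-- ===== LEMMAS AND PROOFS =====

-- reference computation: greedy multiset matching, over lists of keys
def pvRef : List (Int × Int × String) → List (Int × Int × String) → Int → Int
  | [], _, tp => tp
  | k :: kt, rem, tp => if k ∈ rem then pvRef kt (rem.erase k) (tp + 1) else pvRef kt rem tp

-- keys of the still-unused gold entries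
def pvFilt (il : Bool) : List (Int × Int × String) → List Bool → List (Int × Int × String)
  | [], _ => []
  | _ :: _, [] => []
  | g :: gt, u :: ut => if u then pvFilt il gt ut else pvKey il g :: pvFilt il gt ut

lemma pvKey_eq_iff (il : Bool) (s e : Int) (l : String) (gs ge : Int) (gl : String) :
    pvKey il (s, e, l) = pvKey il (gs, ge, gl) ↔ (s = gs ∧ e = ge ∧ (il = true ∨ l = gl)) := by
  cases il <;> simp [pvKey]

-- A's inner scan either fails (key absent among unused gold keys) or marks the first unused match,
-- which erases the first occurrence of the key from the unused-key list
lemma pvMark_spec (s e : Int) (l : String) (il : Bool) :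
    ∀ (gold : List (Int × Int × String)) (used : List Bool), used.length = gold.length →
    (pvMark s e l il gold used = none ∧ pvKey il (s, e, l) ∉ pvFilt il gold used) ∨
    (∃ used', pvMark s e l il gold used = some used' ∧ used'.length = gold.length ∧
      pvKey il (s, e, l) ∈ pvFilt il gold used ∧
      pvFilt il gold used' = (pvFilt il gold used).erase (pvKey il (s, e, l))) := by
  intro gold
  induction gold with
  | nil => intro used h; left; cases used with
    | nil => exact ⟨rfl, by simp [pvFilt]⟩
    | cons u ut => simp at h
  | cons g gt ih =>
    intro used h
    cases used with
    | nil => simp at h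
    | cons u ut =>
      obtain ⟨gs, ge, gl⟩ := g
      simp only [List.length_cons] at h
      have h' : ut.length = gt.length := by omega
      by_cases hu : u = true
      · subst hu
        rcases ih ut h' with ⟨hn, hm⟩ | ⟨used', hs, hl, hm, hf⟩
        · left; constructor
          · simp [pvMark, hn]
          · simpa [pvFilt] using hm
        · right; exact ⟨true :: used', by simp [pvMark, hs], by simp [hl],
            by simpa [pvFilt] using hm, by simpa [pvFilt] using hf⟩
      · have hu' : u = false := by simp at hu; exact hu
        subst hu'
        by_cases hc : s = gs ∧ e = ge ∧ (il = true ∨ l = gl)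
        · right
          have hk : pvKey il (s, e, l) = pvKey il (gs, ge, gl) := (pvKey_eq_iff ..).mpr hc
          refine ⟨true :: ut, by simp [pvMark, hc], by simp [h'], by simp [pvFilt, hk], ?_⟩
          simp [pvFilt, hk, List.erase_cons_head]
        · have hk : pvKey il (s, e, l) ≠ pvKey il (gs, ge, gl) := fun hh => hc ((pvKey_eq_iff ..).mp hh)
          rcases ih ut h' with ⟨hn, hm⟩ | ⟨used', hs, hl, hm, hf⟩
          · left; constructor
            · simp [pvMark, hc, hn]
            · simp [pvFilt, hm, hk]
          · right; refine ⟨false :: used', by simp [pvMark, hc, hs], by simp [hl], by simp [pvFilt, hm], ?_⟩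
            rw [show pvFilt il ((gs,ge,gl) :: gt) (false :: used') = pvKey il (gs,ge,gl) :: pvFilt il gt used' from by simp [pvFilt]]
            rw [show pvFilt il ((gs,ge,gl) :: gt) (false :: ut) = pvKey il (gs,ge,gl) :: pvFilt il gt ut from by simp [pvFilt]]
            rw [List.erase_cons_tail (by simpa using hk.symm), hf]

lemma pvFilt_replicate (il : Bool) (gold : List (Int × Int × String)) :
    pvFilt il gold (List.replicate gold.length false) = gold.map (pvKey il) := by
  induction gold with
  | nil => rfl
  | cons g gt ih => simp [pvFilt, List.replicate, ih]

-- A's outer loop computes the greedy reference over the unused gold keys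
lemma pvFoldA (il : Bool) (gold : List (Int × Int × String)) :
    ∀ (pred : List (Int × Int × String)) (used : List Bool) (tp : Int), used.length = gold.length →
    (pred.foldl (fun (st : List Bool × Int) p =>
      match pvMark p.1 p.2.1 p.2.2 il gold st.1 with
      | some used' => (used', st.2 + 1)
      | none => st) (used, tp)).2
    = pvRef (pred.map (pvKey il)) (pvFilt il gold used) tp := by
  intro pred
  induction pred with
  | nil => intro used tp h; rfl
  | cons p pt ih =>
    intro used tp h
    obtain ⟨s, e, l⟩ := p
    simp only [List.foldl_cons, List.map_cons]
    rcases pvMark_spec s e l il gold used h with ⟨hn, hm⟩ | ⟨used', hs, hl, hm, hf⟩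
    · rw [hn, pvRef, if_neg hm]
      exact ih used tp h
    · rw [hs, pvRef, if_pos hm, ← hf]
      exact ih used' (tp + 1) hl

-- B's decrement loop computes the greedy reference whenever the dict counts the remaining keys
lemma pvFoldB (il : Bool) :
    ∀ (ps rem : List (Int × Int × String)) (d : PySem.Dict (Int × Int × String) Int) (tp : Int),
    (∀ k, d.getD k 0 = (rem.count k : Int)) →
    (ps.foldl (fun (st : Int × PySem.Dict (Int × Int × String) Int) p =>
      let k := pvKey il p
      let c := st.2.getD k 0
      if c > 0 then (st.1 + 1, st.2.insert k (c - 1)) else st) (tp, d)).1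
    = pvRef (ps.map (pvKey il)) rem tp := by
  intro ps
  induction ps with
  | nil => intro rem d tp hinv; rfl
  | cons p pt ih =>
    intro rem d tp hinv
    simp only [List.foldl_cons, List.map_cons]
    by_cases hm : pvKey il p ∈ rem
    · have hc : d.getD (pvKey il p) 0 > 0 := by
        rw [hinv]; exact_mod_cast List.count_pos_iff.mpr hm
      rw [pvRef, if_pos hm]
      simp only [hc, if_pos]
      apply ih
      intro k'
      rw [PySem.Dict.getD_insert]
      by_cases hk : k' = pvKey il p
      · subst hk
        rw [if_pos rfl, hinv, List.count_erase_self]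
        have : 0 < rem.count (pvKey il p) := List.count_pos_iff.mpr hm
        push_cast [Nat.cast_sub this]
        ring
      · rw [if_neg hk, hinv k', List.count_erase_of_ne hk]
    · have hc : ¬ d.getD (pvKey il p) 0 > 0 := by
        rw [hinv]; simp [List.count_eq_zero_of_not_mem hm]
      rw [pvRef, if_neg hm]
      simp only [hc, if_false]
      exact ih rem d tp hinv

-- ===== VERDICT (by name: the statement is the Claim_ definition above) =====
theorem strict_match_spec : Claim_equal_strict_match := by
  intro pred gold il _
  unfold Spec_strict_match strict_match strict_match_alt
  have hA := pvFoldA il gold pred (List.replicate gold.length false) 0 (by simp)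
  rw [pvFilt_replicate] at hA
  have hcnt : ∀ k, (gold.foldl (fun (d : PySem.Dict (Int × Int × String) Int) g =>
      let k := pvKey il g
      d.insert k (d.getD k 0 + 1)) PySem.Dict.empty).getD k 0
      = ((gold.map (pvKey il)).count k : Int) := by
    intro k
    show (gold.foldl (fun (d : PySem.Dict (Int × Int × String) Int) g =>
        d.insert (pvKey il g) (d.getD (pvKey il g) 0 + 1)) PySem.Dict.empty).getD k 0 = _
    rw [← List.foldl_map (f := pvKey il)
        (g := fun (d : PySem.Dict (Int × Int × String) Int) x => d.insert x (d.getD x 0 + 1))]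
    rw [PySem.Dict.getD_foldl_insert_add_one]
    simp
  have hB := pvFoldB il pred (gold.map (pvKey il)) _ 0 hcnt
  simp only [hA, hB]
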